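-- pv_equiv track=rewrite | github.com/laserkelvin/PySpecTools | pyspectools/qchem/utils.py | split_zmat
-- ===== SOURCE A (Python) =====
-- def split_zmat(zmat_list):
--     """
--         Function that will convert a ZMAT into a dictionary.
--     """
--     connectivity = list()
--     parameters = list()
--     # Loop over list containing ZMAT strings; first line is
--     # comment line
--     read_next = False
--     for line in zmat_list[1:]:
--         if line == "\n":
--             if read_next is True:
--                 break
--             else:
--                 read_next = True
--         if read_next is False:
--             connectivity.append(line)
--         if read_next is True:
--             parameters.append(line)
--     return connectivity, parameters
-- ===== SOURCE B (Python) =====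
-- def split_zmat(zmat_list):
--     body = zmat_list[1:]
--     try:
--         i = body.index("\n")
--     except ValueError:
--         return body, []
--     rest = body[i + 1:]
--     try:
--         j = rest.index("\n")
--     except ValueError:
--         return body[:i], body[i:]
--     return body[:i], body[i:i + 1 + j]
-- ===== Notes on version B (the rewrite author's own statement) =====
-- stated objective: alternative
-- what changed: Replaces the flag-driven append loop with locating the first and second blank lines via list.index and returning slices.
import Mathlib
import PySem

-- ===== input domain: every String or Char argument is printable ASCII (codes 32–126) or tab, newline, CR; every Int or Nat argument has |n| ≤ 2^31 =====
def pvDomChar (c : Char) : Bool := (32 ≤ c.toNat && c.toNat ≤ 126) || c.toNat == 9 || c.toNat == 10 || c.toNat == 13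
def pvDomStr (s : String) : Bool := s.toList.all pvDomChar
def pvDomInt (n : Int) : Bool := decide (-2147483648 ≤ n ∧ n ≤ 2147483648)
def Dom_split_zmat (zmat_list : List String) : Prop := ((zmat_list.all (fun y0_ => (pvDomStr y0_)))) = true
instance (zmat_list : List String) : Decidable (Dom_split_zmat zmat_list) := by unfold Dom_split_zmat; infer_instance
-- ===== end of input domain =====

-- B locates the first and second blank lines with list.index and returns slices,
-- instead of A's flag-driven append loop ("alternative": same cost, different decomposition).

-- ===== PORT A =====
-- A's for-loop with state (connectivity, parameters, read_next); the 'break' is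
-- transcribed as returning the accumulated state.
def splitZmatLoopA : List String → List String → List String → Bool → List String × List String
  | [], conn, params, _ => (conn, params)
  | line :: rest, conn, params, readNext =>
    if line = "\n" then
      if readNext then (conn, params)                               -- break
      else splitZmatLoopA rest conn (params ++ [line]) true          -- read_next := True; appended to parameters
    else
      if readNext then splitZmatLoopA rest conn (params ++ [line]) true
      else splitZmatLoopA rest (conn ++ [line]) params false

def split_zmat (zmat_list : List String) : List String × List String :=
  splitZmatLoopA (PySem.List.slice zmat_list (some 1) none) [] [] false

-- ===== PORT B =====
-- body.index("\n") → PySem.List.index?; the slices body[:i], body[i:], body[i:i+1+j],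
-- body[i+1:] (with i,j natural in-range indices) are take/drop, exact per slice_natCast.
def split_zmat_alt (zmat_list : List String) : List String × List String :=
  let body := PySem.List.slice zmat_list (some 1) none
  match PySem.List.index? body "\n" with
  | none => (body, [])
  | some i =>
    let rest := body.drop (i + 1)
    match PySem.List.index? rest "\n" with
    | none => (body.take i, body.drop i)
    | some j => (body.take i, (body.drop i).take (1 + j))

-- ===== PRECONDITION & SPEC =====
def Spec_split_zmat (zmat_list : List String) (out : List String × List String) : Prop := out = split_zmat_alt zmat_list
instance (zmat_list : List String) (out : List String × List String) : Decidable (Spec_split_zmat zmat_list out) := by unfold Spec_split_zmat; infer_instance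

-- ===== CLAIM (what is proved, stated in full; the proofs are below) =====
def Claim_equal_split_zmat : Prop := ∀ (zmat_list : List String), Dom_split_zmat zmat_list → Spec_split_zmat zmat_list (split_zmat zmat_list)

-- ===== LEMMAS AND PROOFS =====

-- The read_next = true phase appends everything up to (excluding) the next blank line.
theorem loopA_true (l : List String) (conn params : List String) :
    splitZmatLoopA l conn params true =
      (conn, params ++ (match PySem.List.index? l "\n" with
                        | none => l
                        | some j => l.take j)) := by
  induction l generalizing params with
  | nil => simp [splitZmatLoopA, PySem.List.index?]
  | cons x l ih =>
    by_cases hx : x = "\n"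
    · subst hx
      rw [PySem.List.index?_cons_self]
      simp [splitZmatLoopA]
    · rw [PySem.List.index?_cons_of_ne l hx]
      simp only [splitZmatLoopA, if_neg hx, ih]
      cases PySem.List.index? l "\n" with
      | none => simp
      | some j => simp [List.take_succ_cons]

-- The read_next = false phase accumulates connectivity up to the first blank line,
-- then hands over to the true phase after that blank line.
theorem loopA_false (l : List String) (conn params : List String) :
    splitZmatLoopA l conn params false =
      (match PySem.List.index? l "\n" with
       | none => (conn ++ l, params)
       | some i => splitZmatLoopA (l.drop (i + 1)) (conn ++ l.take i) (params ++ ["\n"]) true) := by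
  induction l generalizing conn with
  | nil => simp [splitZmatLoopA, PySem.List.index?]
  | cons x l ih =>
    by_cases hx : x = "\n"
    · subst hx
      rw [PySem.List.index?_cons_self]
      simp [splitZmatLoopA]
    · rw [PySem.List.index?_cons_of_ne l hx]
      simp only [splitZmatLoopA, if_neg hx, ih]
      cases PySem.List.index? l "\n" with
      | none => simp
      | some i => simp [List.take_succ_cons]

theorem drop_of_index? (l : List String) (i : ℕ)
    (h : PySem.List.index? l "\n" = some i) :
    l.drop i = "\n" :: l.drop (i + 1) := by
  obtain ⟨pre, suf, rfl, hlen, -⟩ := (PySem.List.index?_eq_some_iff l "\n" i).1 h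
  subst hlen
  simp [List.drop_append, List.drop_left']

-- ===== VERDICT (by name: the statement is the Claim_ definition above) =====
theorem split_zmat_spec : Claim_equal_split_zmat := by
  intro zmat_list _
  unfold Spec_split_zmat split_zmat split_zmat_alt
  set body := PySem.List.slice zmat_list (some 1) none with hbody
  rw [loopA_false]
  cases hib : PySem.List.index? body "\n" with
  | none => simp only [hib, List.nil_append]
  | some i =>
    simp only [hib, List.nil_append]
    rw [loopA_true]
    cases hjr : PySem.List.index? (body.drop (i + 1)) "\n" with
    | none =>
      dsimp only
      rw [drop_of_index? body i hib]
      rfl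
    | some j =>
      dsimp only
      rw [drop_of_index? body i hib, Nat.add_comm 1 j, List.take_succ_cons]
      rfl
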